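-- pv_equiv track=rewrite | github.com/srihariprasad-r/workable-code | Practice problems/graphs/kosaraju_scc.py | chef_build_graph
-- ===== SOURCE A (Python) =====
-- def chef_build_graph(val, N, visited):
--     order = []
--     chef_adjlist = {}
--     chef_transposed_graph = {}
--
--     for i in range(N):
--          # this is to decide rotation to be made based on val[i]
--          # val[i] is 0-index array,  we add 1 to it along with its index and do a modulo with N nodes
--          # so, (val[i] + 1 + i) % N gives node which is destination or a cyle which is connected component
--         dest = (val[i]+i+1)%N
--         chef_adjlist.setdefault(i, []).append(dest)
--         chef_transposed_graph.setdefault(dest,[]).append(i)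
--
--     for i in range(1, N):
--         if not visited[i-1]:
--             order = chef_order_dfs(chef_adjlist, i-1, visited, order)
--
--     return order, chef_adjlist, chef_transposed_graph
--
-- def chef_order_dfs(lst, node, visited, order):
--     if not visited[node]:
--         visited[node] = 1
--
--     if node in lst:
--         for child in lst[node]:
--             if not visited[child]:
--                 chef_order_dfs(lst, child, visited, order)
--
--     order.append(node)
--
--     return order
-- ===== SOURCE B (Python) =====
-- # B: same graph/transpose construction via a precomputed destination list, but the
-- # recursive post-order DFS is replaced by an iterative chain walk (out-degree is 1):
-- # collect the unvisited chain, then append it reversed.  Mutates `visited` in place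
-- # exactly like A; the equivalence proved is about the return value.
-- def chef_build_graph(val, N, visited):
--     dests = [(val[i] + i + 1) % N for i in range(N)]
--     chef_adjlist = {i: [dests[i]] for i in range(N)}
--     chef_transposed_graph = {}
--     for i in range(N):
--         chef_transposed_graph.setdefault(dests[i], []).append(i)
--     order = []
--     for i in range(1, N):
--         if not visited[i - 1]:
--             node = i - 1
--             chain = []
--             while not visited[node]:
--                 visited[node] = 1
--                 chain.append(node)
--                 node = dests[node]
--             order.extend(reversed(chain))
--     return order, chef_adjlist, chef_transposed_graph
-- ===== Notes on version B (the rewrite author's own statement) =====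
-- stated objective: idiomatic
-- what changed: The recursive post-order DFS helper is replaced by an iterative chain walk (each node has out-degree 1): collect the unvisited chain, mark as you go, and extend order with the chain reversed; destinations are precomputed once and the dicts are built from that list.
import Mathlib
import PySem

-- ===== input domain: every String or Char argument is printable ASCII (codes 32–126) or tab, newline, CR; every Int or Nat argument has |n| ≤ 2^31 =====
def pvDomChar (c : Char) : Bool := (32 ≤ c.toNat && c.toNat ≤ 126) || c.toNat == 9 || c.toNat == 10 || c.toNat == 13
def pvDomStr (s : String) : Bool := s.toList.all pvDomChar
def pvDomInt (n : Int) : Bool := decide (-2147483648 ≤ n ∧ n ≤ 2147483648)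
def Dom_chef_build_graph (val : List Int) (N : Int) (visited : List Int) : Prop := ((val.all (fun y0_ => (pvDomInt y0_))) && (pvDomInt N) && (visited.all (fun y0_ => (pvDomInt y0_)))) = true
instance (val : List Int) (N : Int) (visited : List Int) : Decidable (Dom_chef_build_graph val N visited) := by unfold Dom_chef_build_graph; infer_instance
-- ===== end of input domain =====

-- B replaces A's recursive post-order DFS by an iterative chain walk (out-degree 1):
-- collect the unvisited chain and append it reversed.  Both Pythons mutate `visited`
-- in place identically; the equivalence proved is about the return value.

-- ===== PORT A =====
-- chef_order_dfs, with fuel only to make the recursion total (never exhausted under Pre_);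
-- returns (order, visited) since Python mutates `visited` in place.  Indices are nonnegative
-- and in range under Pre_, so `pyGetD`/`set node.toNat` are exact there.
def pvDfsA (fuel : Nat) (lst : PySem.Dict Int (List Int)) (node : Int) (visited : List Int)
    (order : List Int) : List Int × List Int :=
  match fuel with
  | 0 => (order, visited)
  | fuel+1 =>
    let v1 := if PySem.List.pyGetD visited node 0 != 0 then visited else visited.set node.toNat 1
    let s :=
      match lst.get? node with
      | some children =>
        children.foldl (fun (s : List Int × List Int) child =>
          if PySem.List.pyGetD s.2 child 0 != 0 then s
          else pvDfsA fuel lst child s.2 s.1) (order, v1)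
      | none => (order, v1)
    (s.1 ++ [node], s.2)

def chef_build_graph (val : List Int) (N : Int) (visited : List Int) :
    List Int × (List (Int × List Int)) × (List (Int × List Int)) :=
  -- for i in range(N): setdefault-append on both dicts (setdefault(k,[]).append(x) = modify k [] (· ++ [x]))
  let gs := (PySem.List.pyRange 0 N).foldl
    (fun (s : PySem.Dict Int (List Int) × PySem.Dict Int (List Int)) i =>
      (s.1.modify i [] (fun v => v ++ [PySem.Int.mod (PySem.List.pyGetD val i 0 + i + 1) N]),
       s.2.modify (PySem.Int.mod (PySem.List.pyGetD val i 0 + i + 1) N) [] (fun v => v ++ [i])))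
    (PySem.Dict.empty, PySem.Dict.empty)
  -- for i in range(1, N): if not visited[i-1]: order = chef_order_dfs(adj, i-1, visited, order)
  let ov := (PySem.List.pyRange 1 N).foldl
    (fun (s : List Int × List Int) i =>
      if PySem.List.pyGetD s.2 (i-1) 0 != 0 then s
      else pvDfsA (s.2.length + 1) gs.1 (i-1) s.2 s.1)
    ([], visited)
  (ov.1, gs.1.items, gs.2.items)

-- ===== PORT B =====
-- the while-loop chain walk; fuel only for totality (never exhausted under Pre_)
def pvWalkB (fuel : Nat) (dests : List Int) (node : Int) (visited : List Int)
    (chain : List Int) : List Int × List Int :=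
  match fuel with
  | 0 => (chain, visited)
  | fuel+1 =>
    if PySem.List.pyGetD visited node 0 != 0 then (chain, visited)
    else pvWalkB fuel dests (PySem.List.pyGetD dests node 0) (visited.set node.toNat 1)
      (chain ++ [node])

def chef_build_graph_alt (val : List Int) (N : Int) (visited : List Int) :
    List Int × (List (Int × List Int)) × (List (Int × List Int)) :=
  let dests := (PySem.List.pyRange 0 N).map
    (fun i => PySem.Int.mod (PySem.List.pyGetD val i 0 + i + 1) N)
  let adj := (PySem.List.pyRange 0 N).foldl
    (fun (d : PySem.Dict Int (List Int)) i => d.insert i [PySem.List.pyGetD dests i 0])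
    PySem.Dict.empty
  let trans := (PySem.List.pyRange 0 N).foldl
    (fun (d : PySem.Dict Int (List Int)) i =>
      d.modify (PySem.List.pyGetD dests i 0) [] (fun v => v ++ [i]))
    PySem.Dict.empty
  let ov := (PySem.List.pyRange 1 N).foldl
    (fun (s : List Int × List Int) i =>
      if PySem.List.pyGetD s.2 (i-1) 0 != 0 then s
      else
        let r := pvWalkB (s.2.length + 1) dests (i-1) s.2 []
        (s.1 ++ r.1.reverse, r.2))
    ([], visited)
  (ov.1, adj.items, trans.items)

-- ===== PRECONDITION & SPEC =====
-- Pre_ excludes inputs where val or visited is shorter than N: there A raises IndexError,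
-- except in rare cases where every short index happens to be unreachable (then A returns
-- and B returns the same value; Pre_ is slightly narrower than its reason).
def Pre_chef_build_graph (val : List Int) (N : Int) (visited : List Int) : Prop :=
  N ≤ 0 ∨ (N ≤ (val.length : Int) ∧ N ≤ (visited.length : Int))
instance (val : List Int) (N : Int) (visited : List Int) : Decidable (Pre_chef_build_graph val N visited) := by unfold Pre_chef_build_graph; infer_instance

def pvWitness_chef_build_graph : List Int × Int × List Int := ([1, 0, 2], 3, [0, 0, 0])

def Spec_chef_build_graph (val : List Int) (N : Int) (visited : List Int) (out : List Int × (List (Int × List Int)) × (List (Int × List Int))) : Prop := out = chef_build_graph_alt val N visited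
instance (val : List Int) (N : Int) (visited : List Int) (out : List Int × (List (Int × List Int)) × (List (Int × List Int))) : Decidable (Spec_chef_build_graph val N visited out) := by unfold Spec_chef_build_graph; infer_instance

-- ===== CLAIM (what is proved, stated in full; the proofs are below) =====
def Claim_equal_chef_build_graph : Prop := ∀ (val : List Int) (N : Int) (visited : List Int), Dom_chef_build_graph val N visited → Pre_chef_build_graph val N visited → Spec_chef_build_graph val N visited (chef_build_graph val N visited)

-- ===== LEMMAS AND PROOFS =====

-- a finished walk: starting at an already-visited node returns immediately
lemma pvWalkB_stop (fuel : Nat) (dests : List Int) (node : Int) (v c : List Int)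
    (h : PySem.List.pyGetD v node 0 ≠ 0) :
    pvWalkB fuel dests node v c = (c, v) := by
  cases fuel <;> simp [pvWalkB, h]

-- the chain accumulator only prepends
lemma pvWalkB_acc (fuel : Nat) (dests : List Int) (node : Int) (v c : List Int) :
    pvWalkB fuel dests node v c =
      (c ++ (pvWalkB fuel dests node v []).1, (pvWalkB fuel dests node v []).2) := by
  induction fuel generalizing node v c with
  | zero => simp [pvWalkB]
  | succ f ih =>
    simp only [pvWalkB]
    by_cases h : PySem.List.pyGetD v node 0 != 0
    · simp [h]
    · simp only [h, Bool.false_eq_true, if_false]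
      rw [ih, ih (c := [] ++ [node])]
      simp

lemma pvWalkB_len (fuel : Nat) (dests : List Int) (node : Int) (v c : List Int) :
    (pvWalkB fuel dests node v c).2.length = v.length := by
  induction fuel generalizing node v c with
  | zero => simp [pvWalkB]
  | succ f ih =>
    simp only [pvWalkB]
    by_cases h : PySem.List.pyGetD v node 0 != 0
    · simp [h]
    · simp [h, ih, List.length_set]

-- marking a zero entry removes exactly one zero
lemma count_set_zero (v : List Int) (n : Nat) (h : n < v.length) (h0 : v[n] = 0) :
    (v.set n 1).count 0 + 1 = v.count 0 := by
  induction v generalizing n with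
  | nil => simp at h
  | cons a t ih =>
    cases n with
    | zero => simp_all
    | succ m =>
      have hset : (a :: t).set (m+1) 1 = a :: t.set m 1 := by simp
      rw [hset]
      simp only [List.count_cons]
      have := ih m (by simpa using h) (by simpa using h0)
      omega

-- core: the recursive DFS equals the iterative chain walk (reversed) when out-degree is 1
lemma dfs_eq_walk (N : Int) (dests : List Int) (adj : PySem.Dict Int (List Int))
    (Hadj : ∀ m : Int, 0 ≤ m → m < N → adj.get? m = some [PySem.List.pyGetD dests m 0])
    (Hdest : ∀ m : Int, 0 ≤ m → m < N →
      0 ≤ PySem.List.pyGetD dests m 0 ∧ PySem.List.pyGetD dests m 0 < N) :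
    ∀ (fuel : Nat) (node : Int) (v order : List Int),
      0 ≤ node → node < N → N ≤ (v.length : Int) →
      PySem.List.pyGetD v node 0 = 0 → v.count 0 < fuel →
      pvDfsA fuel adj node v order =
        (order ++ (pvWalkB fuel dests node v []).1.reverse,
         (pvWalkB fuel dests node v []).2) := by
  intro fuel
  induction fuel with
  | zero => intro node v order _ _ _ _ hc; omega
  | succ f ih =>
    intro node v order h0 h1 hlen hread hc
    have hnode : node.toNat < v.length := by omega
    have hget : v[node.toNat] = 0 := by
      have := PySem.List.pyGetD_eq_getElem v (i := node) 0 h0 (by omega)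
      rw [hread] at this; exact this.symm
    have hcnt : ((v.set node.toNat 1).count 0) + 1 = v.count 0 :=
      count_set_zero v node.toNat hnode hget
    have hv1len : ((v.set node.toNat 1).length : Int) = (v.length : Int) := by
      simp [List.length_set]
    simp only [pvDfsA, pvWalkB, hread]
    simp only [bne_self_eq_false, Bool.false_eq_true, if_false]
    rw [Hadj node h0 h1]
    simp only [List.foldl_cons, List.foldl_nil, List.nil_append]
    set next := PySem.List.pyGetD dests node 0 with hnext
    obtain ⟨hn0, hn1⟩ := Hdest node h0 h1
    by_cases h : PySem.List.pyGetD (v.set node.toNat 1) next 0 = 0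
    · -- next is unvisited: A recurses, B continues the walk
      have hb : (PySem.List.pyGetD (v.set node.toNat 1) next 0 != 0) = false := by
        simp [h]
      rw [ih next (v.set node.toNat 1) order hn0 hn1 (by omega) h (by omega)]
      rw [pvWalkB_acc f dests next (v.set node.toNat 1) [node]]
      simp [hb]
    · have hb : (PySem.List.pyGetD (v.set node.toNat 1) next 0 != 0) = true := by
        simpa using h
      rw [pvWalkB_acc f dests next (v.set node.toNat 1) [node],
          pvWalkB_stop f dests next (v.set node.toNat 1) [] h]
      simp [hb]

-- the driving loop over range(1, N) agrees step by step
lemma loop_eq (N : Int) (dests : List Int) (adj : PySem.Dict Int (List Int))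
    (Hadj : ∀ m : Int, 0 ≤ m → m < N → adj.get? m = some [PySem.List.pyGetD dests m 0])
    (Hdest : ∀ m : Int, 0 ≤ m → m < N →
      0 ≤ PySem.List.pyGetD dests m 0 ∧ PySem.List.pyGetD dests m 0 < N) :
    ∀ (l : List Int), (∀ i ∈ l, 1 ≤ i ∧ i < N) →
      ∀ (s : List Int × List Int), N ≤ (s.2.length : Int) →
      l.foldl (fun (s : List Int × List Int) i =>
          if PySem.List.pyGetD s.2 (i-1) 0 != 0 then s
          else pvDfsA (s.2.length + 1) adj (i-1) s.2 s.1) s =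
      l.foldl (fun (s : List Int × List Int) i =>
          if PySem.List.pyGetD s.2 (i-1) 0 != 0 then s
          else
            (s.1 ++ (pvWalkB (s.2.length + 1) dests (i-1) s.2 []).1.reverse,
             (pvWalkB (s.2.length + 1) dests (i-1) s.2 []).2)) s := by
  intro l
  induction l with
  | nil => intro _ s _; rfl
  | cons i t ih =>
    intro hmem s hlen
    obtain ⟨hi1, hi2⟩ := hmem i (by simp)
    simp only [List.foldl_cons]
    by_cases h : PySem.List.pyGetD s.2 (i-1) 0 = 0
    · have hb : (PySem.List.pyGetD s.2 (i-1) 0 != 0) = false := by simp [h]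
      rw [hb]
      simp only [Bool.false_eq_true, if_false]
      rw [dfs_eq_walk N dests adj Hadj Hdest (s.2.length + 1) (i-1) s.2 s.1
        (by omega) (by omega) hlen h (by have := List.count_le_length (l := s.2) (a := 0); omega)]
      exact ih (fun j hj => hmem j (by simp [hj])) _
        (by rw [pvWalkB_len]; exact hlen)
    · have hb : (PySem.List.pyGetD s.2 (i-1) 0 != 0) = true := by simpa using h
      rw [hb]
      simp only [if_true]
      exact ih (fun j hj => hmem j (by simp [hj])) s hlen

-- a setdefault-append loop over fresh distinct keys appends its items
lemma items_foldl_modify_fresh (l : List Int) (g : Int → Int)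
    (d : PySem.Dict Int (List Int))
    (hf : ∀ a ∈ l, d.contains a = false) (hn : l.Nodup) :
    (l.foldl (fun d i => d.modify i [] (fun v => v ++ [g i])) d).items =
      d.items ++ l.map (fun i => (i, [g i])) := by
  induction l generalizing d with
  | nil => simp
  | cons a t ih =>
    have hca : d.contains a = false := hf a (by simp)
    have hmod : d.modify a [] (fun v => v ++ [g a]) = d.insert a [g a] := by
      simp [PySem.Dict.modify, PySem.Dict.getD_of_not_contains d [] hca]
    simp only [List.foldl_cons, List.map_cons, hmod]
    rw [ih (d.insert a [g a])
      (fun b hb => by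
        rw [PySem.Dict.contains_insert]
        have : b ≠ a := by rintro rfl; exact (List.nodup_cons.mp hn).1 hb
        simp [this, hf b (by simp [hb])])
      (List.nodup_cons.mp hn).2]
    rw [PySem.Dict.items_insert_of_not_contains d [g a] hca]
    simp

-- ===== VERDICT (by name: the statement is the Claim_ definition above) =====
theorem chef_build_graph_spec : Claim_equal_chef_build_graph := by
  intro val N visited _hdom hpre
  unfold Spec_chef_build_graph
  by_cases hN : N ≤ 0
  · have h0 : PySem.List.pyRange 0 N = [] := PySem.List.pyRange_one_eq_nil hN
    have h1 : PySem.List.pyRange 1 N = [] := PySem.List.pyRange_one_eq_nil (by omega)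
    simp [chef_build_graph, chef_build_graph_alt, h0, h1]
  · have hNpos : 0 < N := by omega
    have hlen : N ≤ (val.length : Int) ∧ N ≤ (visited.length : Int) := by
      rcases hpre with h | h
      · omega
      · exact h
    obtain ⟨hval, hvis⟩ := hlen
    have hRmem : ∀ i ∈ PySem.List.pyRange 0 N, 0 ≤ i ∧ i < N := by
      intro i hi; exact PySem.List.mem_pyRange_one.mp hi
    have hnodup : (PySem.List.pyRange 0 N).Nodup := PySem.List.nodup_pyRange_one 0 N
    have hfresh : ∀ a ∈ PySem.List.pyRange 0 N,
        (PySem.Dict.empty : PySem.Dict Int (List Int)).contains a = false := by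
      intro a _; simp
    -- destinations list and its pointwise value
    have hda : ∀ m : Int, 0 ≤ m → m < N →
        PySem.List.pyGetD ((PySem.List.pyRange 0 N).map
          (fun i => PySem.Int.mod (PySem.List.pyGetD val i 0 + i + 1) N)) m 0 =
        PySem.Int.mod (PySem.List.pyGetD val m 0 + m + 1) N := by
      intro m hm0 hm1
      have hNc : ((N.toNat : Int)) = N := Int.toNat_of_nonneg (le_of_lt hNpos)
      have hmc : ((m.toNat : Int)) = m := Int.toNat_of_nonneg hm0
      have h := PySem.List.pyGetD_map_pyRange
        (fun i => PySem.Int.mod (PySem.List.pyGetD val i 0 + i + 1) N)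
        N.toNat m.toNat 0 (by omega)
      rw [hNc, hmc] at h
      exact h
    simp only [chef_build_graph, chef_build_graph_alt]
    rw [PySem.List.foldl_prod_mk
        (f := fun (d : PySem.Dict Int (List Int)) (i : Int) =>
          d.modify i [] (fun v => v ++ [PySem.Int.mod (PySem.List.pyGetD val i 0 + i + 1) N]))
        (g := fun (d : PySem.Dict Int (List Int)) (i : Int) =>
          d.modify (PySem.Int.mod (PySem.List.pyGetD val i 0 + i + 1) N) [] (fun v => v ++ [i]))]
    -- the two adjacency dicts agree
    have hBitems := PySem.Dict.items_foldl_insert_fresh (PySem.List.pyRange 0 N)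
      (fun a => a)
      (fun a => [PySem.List.pyGetD ((PySem.List.pyRange 0 N).map
          (fun i => PySem.Int.mod (PySem.List.pyGetD val i 0 + i + 1) N)) a 0])
      PySem.Dict.empty hfresh (by simpa using hnodup)
    have hadjAB :
        ((PySem.List.pyRange 0 N).foldl (fun (d : PySem.Dict Int (List Int)) i =>
          d.modify i [] (fun v => v ++ [PySem.Int.mod (PySem.List.pyGetD val i 0 + i + 1) N]))
          PySem.Dict.empty) =
        ((PySem.List.pyRange 0 N).foldl (fun (d : PySem.Dict Int (List Int)) i =>
          d.insert i [PySem.List.pyGetD ((PySem.List.pyRange 0 N).map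
            (fun i => PySem.Int.mod (PySem.List.pyGetD val i 0 + i + 1) N)) i 0])
          PySem.Dict.empty) := by
      apply PySem.Dict.ext
      rw [items_foldl_modify_fresh _ _ _ hfresh hnodup, hBitems]
      refine congrArg _ (List.map_congr_left ?_)
      intro i hi
      obtain ⟨h1, h2⟩ := hRmem i hi
      simp only []
      rw [hda i h1 h2]
    -- the two transposed dicts agree
    have htransAB :
        ((PySem.List.pyRange 0 N).foldl (fun (d : PySem.Dict Int (List Int)) i =>
          d.modify (PySem.Int.mod (PySem.List.pyGetD val i 0 + i + 1) N) [] (fun v => v ++ [i]))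
          PySem.Dict.empty) =
        ((PySem.List.pyRange 0 N).foldl (fun (d : PySem.Dict Int (List Int)) i =>
          d.modify (PySem.List.pyGetD ((PySem.List.pyRange 0 N).map
            (fun i => PySem.Int.mod (PySem.List.pyGetD val i 0 + i + 1) N)) i 0) [] (fun v => v ++ [i]))
          PySem.Dict.empty) := by
      apply PySem.List.foldl_congr_mem
      intro d i hi
      obtain ⟨h1, h2⟩ := hRmem i hi
      rw [hda i h1 h2]
    -- lookup facts about B's adjacency dict
    have hknd : ((PySem.List.pyRange 0 N).foldl (fun (d : PySem.Dict Int (List Int)) i =>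
        d.insert i [PySem.List.pyGetD ((PySem.List.pyRange 0 N).map
          (fun i => PySem.Int.mod (PySem.List.pyGetD val i 0 + i + 1) N)) i 0])
        PySem.Dict.empty).keys.Nodup := by
      apply PySem.Dict.nodup_keys_foldl_insert
      simp
    have Hadj : ∀ m : Int, 0 ≤ m → m < N →
        ((PySem.List.pyRange 0 N).foldl (fun (d : PySem.Dict Int (List Int)) i =>
          d.insert i [PySem.List.pyGetD ((PySem.List.pyRange 0 N).map
            (fun i => PySem.Int.mod (PySem.List.pyGetD val i 0 + i + 1) N)) i 0])
          PySem.Dict.empty).get? m =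
        some [PySem.List.pyGetD ((PySem.List.pyRange 0 N).map
          (fun i => PySem.Int.mod (PySem.List.pyGetD val i 0 + i + 1) N)) m 0] := by
      intro m h1 h2
      apply PySem.Dict.get?_of_mem_items _ _ hknd
      rw [hBitems]
      exact List.mem_append_right _ (List.mem_map_of_mem (PySem.List.mem_pyRange_one.mpr ⟨h1, h2⟩))
    have Hdest : ∀ m : Int, 0 ≤ m → m < N →
        0 ≤ PySem.List.pyGetD ((PySem.List.pyRange 0 N).map
          (fun i => PySem.Int.mod (PySem.List.pyGetD val i 0 + i + 1) N)) m 0 ∧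
        PySem.List.pyGetD ((PySem.List.pyRange 0 N).map
          (fun i => PySem.Int.mod (PySem.List.pyGetD val i 0 + i + 1) N)) m 0 < N := by
      intro m h1 h2
      rw [hda m h1 h2]
      exact ⟨PySem.Int.mod_nonneg _ hNpos, PySem.Int.mod_lt _ hNpos⟩
    rw [hadjAB, htransAB]
    have hloop := loop_eq N
      ((PySem.List.pyRange 0 N).map (fun i => PySem.Int.mod (PySem.List.pyGetD val i 0 + i + 1) N))
      _ Hadj Hdest (PySem.List.pyRange 1 N)
      (fun i hi => PySem.List.mem_pyRange_one.mp hi)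
      ([], visited) (by simpa using hvis)
    rw [hloop]
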